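-- pv_equiv track=rewrite | github.com/qibaomyu/envdiff | envdiff/scoper.py | list_scopes
-- ===== SOURCE A (Python) =====
-- from typing import Dict, List, Optional
--
-- def list_scopes(
--     env: Dict[str, str],
--     separator: str = "_",
--     min_keys: int = 1,
-- ) -> List[str]:
--     """Discover all distinct scope prefixes present in *env*.
--
--     A scope is the portion of a key before the first *separator*.
--     Only scopes that have at least *min_keys* keys are returned.
--
--     Returns:
--         Sorted list of scope strings (upper-case).
--     """
--     from collections import Counter
--
--     counts: Counter = Counter()
--     for key in env:
--         if separator in key:
--             prefix = key.split(separator, 1)[0].upper()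
--             counts[prefix] += 1
--
--     return sorted(scope for scope, count in counts.items() if count >= min_keys)
-- ===== SOURCE B (Python) =====
-- from typing import Dict, List
--
--
-- def list_scopes(
--     env: Dict[str, str],
--     separator: str = "_",
--     min_keys: int = 1,
-- ) -> List[str]:
--     """Discover all distinct scope prefixes present in *env*.
--
--     Sort the prefixes first, then emit each run of equal prefixes whose
--     length reaches min_keys: the result comes out already sorted, with no
--     Counter and no final sort over distinct scopes.
--     """
--     prefixes = sorted(
--         key.split(separator, 1)[0].upper() for key in env if separator in key
--     )
--     result: List[str] = []
--     i, n = 0, len(prefixes)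
--     while i < n:
--         j = i + 1
--         while j < n and prefixes[j] == prefixes[i]:
--             j += 1
--         if j - i >= min_keys:
--             result.append(prefixes[i])
--         i = j
--     return result
-- ===== Notes on version B (the rewrite author's own statement) =====
-- stated objective: alternative
-- what changed: Instead of building a Counter over all prefixes and then sorting the qualifying distinct scopes, B sorts the prefix list once and emits each run of equal prefixes whose length reaches min_keys in a single consecutive-run scan, so the Counter dictionary and the final sort over distinct scopes disappear.
import Mathlib
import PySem

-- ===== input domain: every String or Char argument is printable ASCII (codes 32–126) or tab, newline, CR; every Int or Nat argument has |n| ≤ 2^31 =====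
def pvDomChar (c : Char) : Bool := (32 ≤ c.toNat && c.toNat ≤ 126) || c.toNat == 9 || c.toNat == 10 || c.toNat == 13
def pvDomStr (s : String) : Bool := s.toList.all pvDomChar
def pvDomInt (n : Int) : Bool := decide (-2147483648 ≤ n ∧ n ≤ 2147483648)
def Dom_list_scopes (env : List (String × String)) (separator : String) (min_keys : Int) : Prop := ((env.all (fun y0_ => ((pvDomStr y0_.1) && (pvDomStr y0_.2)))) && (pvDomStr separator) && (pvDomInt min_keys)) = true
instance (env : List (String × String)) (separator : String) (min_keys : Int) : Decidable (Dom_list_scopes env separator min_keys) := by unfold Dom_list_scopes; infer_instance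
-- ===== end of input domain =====

-- ===== PORT A =====
-- B is an alternative decomposition: sort the prefixes first and run-length scan,
-- so the distinct-scope Counter and the final sort over scopes disappear.
-- shared helper: key.split(separator, 1)[0].upper()  (both Pythons compute this expression)
def pvPrefix (key separator : String) : String :=
  PySem.Str.upper ((PySem.List.pyGet? ((PySem.Str.splitMax? key separator 1).getD []) 0).getD "")
  -- the two getD defaults are unreachable inside Pre_list_scopes (separator ≠ "" there,
  -- so splitMax? is some and the split list is nonempty)

def list_scopes (env : List (String × String)) (separator : String) (min_keys : Int) : List String :=
  PySem.List.sorted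
    (((env.foldl (fun (counts : PySem.Dict String Int) kv =>
        if PySem.Str.isIn separator kv.1 then counts.modify (pvPrefix kv.1 separator) 0 (· + 1)
        else counts) PySem.Dict.empty).items).filterMap
      (fun sc => if min_keys ≤ sc.2 then some sc.1 else none))
    (fun s => s) false

-- ===== PORT B =====
-- the run-length pass over the sorted prefix list (Source B's while loops:
-- takeWhile = the inner 'j' scan of the current run, dropWhile = 'i = j')
def pvRunScan (xs : List String) (min_keys : Int) : List String :=
  match xs with
  | [] => []
  | x :: rest =>
      let run := rest.takeWhile (fun y => y == x)
      let tl := pvRunScan (rest.dropWhile (fun y => y == x)) min_keys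
      if min_keys ≤ (1 + run.length : Int) then x :: tl else tl
termination_by xs.length
decreasing_by
  exact Nat.lt_succ_of_le (List.length_dropWhile_le _ _)

def list_scopes_alt (env : List (String × String)) (separator : String) (min_keys : Int) : List String :=
  pvRunScan
    (PySem.List.sorted
      (env.filterMap (fun kv =>
        if PySem.Str.isIn separator kv.1 then some (pvPrefix kv.1 separator) else none))
      (fun s => s) false)
    min_keys

-- ===== PRECONDITION & SPEC =====
-- Pre_ excludes only separator = "" with a nonempty env: there Python's key.split("", 1)
-- raises ValueError (in A and in B alike).
def Pre_list_scopes (env : List (String × String)) (separator : String) (min_keys : Int) : Prop :=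
  separator ≠ "" ∨ env = []
instance (env : List (String × String)) (separator : String) (min_keys : Int) :
    Decidable (Pre_list_scopes env separator min_keys) := by unfold Pre_list_scopes; infer_instance
def pvWitness_list_scopes : (List (String × String)) × String × Int :=
  ([("APP_X", "1"), ("APP_Y", "2"), ("DB_H", "3"), ("NOPE", "4")], "_", 2)

def Spec_list_scopes (env : List (String × String)) (separator : String) (min_keys : Int) (out : List String) : Prop := out = list_scopes_alt env separator min_keys
instance (env : List (String × String)) (separator : String) (min_keys : Int) (out : List String) : Decidable (Spec_list_scopes env separator min_keys out) := by unfold Spec_list_scopes; infer_instance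

-- ===== CLAIM (what is proved, stated in full; the proofs are below) =====
def Claim_equal_list_scopes : Prop := ∀ (env : List (String × String)) (separator : String) (min_keys : Int), Dom_list_scopes env separator min_keys → Pre_list_scopes env separator min_keys → Spec_list_scopes env separator min_keys (list_scopes env separator min_keys)

-- ===== LEMMAS AND PROOFS =====

-- A's counting loop over env is Counter(P) for P = the list of prefixes of keys containing the separator.
lemma foldA_eq_counter (env : List (String × String)) (separator : String) :
    env.foldl (fun (counts : PySem.Dict String Int) kv =>
      if PySem.Str.isIn separator kv.1 then
        counts.modify (pvPrefix kv.1 separator) 0 (· + 1)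
      else counts) PySem.Dict.empty
      = PySem.Dict.counter (env.filterMap (fun kv =>
          if PySem.Str.isIn separator kv.1 then some (pvPrefix kv.1 separator) else none)) := by
  rw [PySem.Dict.counter_eq_foldl]
  generalize PySem.Dict.empty = d
  induction env generalizing d with
  | nil => rfl
  | cons kv rest ih =>
      rw [List.foldl_cons, List.filterMap_cons]
      by_cases h : PySem.Str.isIn separator kv.1 = true
      · rw [if_pos h, if_pos h, ih, List.foldl_cons]
      · rw [if_neg h, if_neg h, ih]

-- x does not occur in the dropWhile (== x) part of a ≤-sorted list all of whose elements are ≥ x.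
lemma not_mem_dropWhile (x : String) (rest : List String)
    (hpw : rest.Pairwise (· ≤ ·)) (hge : ∀ y ∈ rest, x ≤ y) :
    x ∉ rest.dropWhile (fun y => y == x) := by
  induction rest with
  | nil => simp
  | cons z t ih =>
      rw [List.dropWhile_cons]
      by_cases h : (z == x) = true
      · simp only [h, if_true]
        exact ih hpw.of_cons (fun y hy => hge y (List.mem_cons_of_mem _ hy))
      · simp only [h, if_false]
        intro hmem
        rcases List.mem_cons.mp hmem with hzx | hxt
        · exact h (by simp [hzx])
        · have h1 : z ≤ x := List.rel_of_pairwise_cons hpw hxt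
          have h2 : x ≤ z := hge z List.mem_cons_self
          exact h (by simp [le_antisymm h1 h2])

-- the run/tail decomposition facts used by both pvRunScan lemmas, on a ≤-sorted x :: rest
lemma pv_run_facts (x : String) (rest : List String) (hpw : (x :: rest).Pairwise (· ≤ ·)) :
    (rest.dropWhile (fun y => y == x)).Pairwise (· ≤ ·)
    ∧ x ∉ rest.dropWhile (fun y => y == x)
    ∧ (∀ y ∈ rest.dropWhile (fun y => y == x), x ≤ y)
    ∧ List.count x (x :: rest) = (rest.takeWhile (fun y => y == x)).length + 1
    ∧ (∀ b, b ≠ x → List.count b (x :: rest) = List.count b (rest.dropWhile (fun y => y == x)))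
    ∧ (∀ b, b ≠ x → (b ∈ rest ↔ b ∈ rest.dropWhile (fun y => y == x))) := by
  have hrestpw : rest.Pairwise (· ≤ ·) := hpw.of_cons
  have hge : ∀ y ∈ rest, x ≤ y := fun y hy => List.rel_of_pairwise_cons hpw hy
  have hsub : List.Sublist (rest.dropWhile (fun y => y == x)) rest := List.dropWhile_sublist _
  have hopw : (rest.dropWhile (fun y => y == x)).Pairwise (· ≤ ·) := hrestpw.sublist hsub
  have hnx : x ∉ rest.dropWhile (fun y => y == x) := not_mem_dropWhile x rest hrestpw hge
  have hsplit : rest.takeWhile (fun y => y == x) ++ rest.dropWhile (fun y => y == x) = rest :=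
    List.takeWhile_append_dropWhile
  have hruncx : List.count x (rest.takeWhile (fun y => y == x))
      = (rest.takeWhile (fun y => y == x)).length := by
    rw [List.count_eq_length]
    intro b hb
    have hbx := List.mem_takeWhile_imp hb
    exact (eq_of_beq hbx).symm
  have hrest_cnt : ∀ b, List.count b (rest.takeWhile (fun y => y == x))
      + List.count b (rest.dropWhile (fun y => y == x)) = List.count b rest := by
    intro b
    rw [← List.count_append, hsplit]
  refine ⟨hopw, hnx, fun y hy => hge y (hsub.mem hy), ?_, ?_, ?_⟩
  · have h1 := hrest_cnt x
    rw [hruncx, List.count_eq_zero.mpr hnx] at h1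
    rw [List.count_cons_self]
    omega
  · intro b hb
    have hbrun : b ∉ rest.takeWhile (fun y => y == x) := by
      intro hmem
      have hbx := List.mem_takeWhile_imp hmem
      exact hb (eq_of_beq hbx)
    have h1 := hrest_cnt b
    rw [List.count_eq_zero.mpr hbrun] at h1
    have h2 : List.count b (x :: rest) = List.count b rest := by
      simp [List.count_cons, hb, Ne.symm hb]
    omega
  · intro b hb
    constructor
    · intro hmem
      rw [← hsplit] at hmem
      rcases List.mem_append.mp hmem with hr | ho
      · have hbx := List.mem_takeWhile_imp hr
        exact absurd (eq_of_beq hbx) hb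
      · exact ho
    · intro ho
      exact hsub.mem ho

-- membership in the run scan of a ≤-sorted list = occurring at least min_keys times
lemma mem_runScan (m : Int) (xs : List String) (hpw : xs.Pairwise (· ≤ ·)) (a : String) :
    a ∈ pvRunScan xs m ↔ a ∈ xs ∧ m ≤ (xs.count a : Int) := by
  induction xs using pvRunScan.induct m with
  | case1 => simp [pvRunScan]
  | case2 x rest run hm ih =>
      obtain ⟨hopw, hnx, _, hcx, hca, hmemo⟩ := pv_run_facts x rest hpw
      have hm' : m ≤ 1 + ((rest.takeWhile (fun y => y == x)).length : Int) := hm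
      simp only [pvRunScan, if_pos hm']
      by_cases ha : a = x
      · subst ha
        have h0 : List.count a rest = (rest.takeWhile (fun y => y == a)).length := by
          have h1 := hcx
          rw [List.count_cons_self] at h1
          omega
        have hc : m ≤ (List.count a rest : Int) + 1 := by rw [h0]; push_cast; omega
        simp [hc]
      · simp only [List.mem_cons, ha, false_or]
        rw [ih hopw, hca a ha, hmemo a ha]
  | case3 x rest run hm ih =>
      obtain ⟨hopw, hnx, _, hcx, hca, hmemo⟩ := pv_run_facts x rest hpw
      have hm' : ¬ m ≤ 1 + ((rest.takeWhile (fun y => y == x)).length : Int) := hm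
      simp only [pvRunScan, if_neg hm']
      rw [ih hopw]
      by_cases ha : a = x
      · subst ha
        constructor
        · intro hmem
          exact absurd hmem.1 hnx
        · rintro ⟨_, hcnt⟩
          rw [hcx] at hcnt
          push_cast at hcnt
          refine absurd ?_ hm'
          push_cast
          omega
      · rw [hca a ha, List.mem_cons, hmemo a ha]
        constructor
        · rintro ⟨h', hc⟩
          exact ⟨Or.inr h', hc⟩
        · rintro ⟨h' | h', hc⟩
          · exact absurd h' ha
          · exact ⟨h', hc⟩

lemma runScan_pairwise_lt (m : Int) (xs : List String) (hpw : xs.Pairwise (· ≤ ·)) :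
    (pvRunScan xs m).Pairwise (· < ·) := by
  induction xs using pvRunScan.induct m with
  | case1 => simp [pvRunScan]
  | case2 x rest run hm ih =>
      obtain ⟨hopw, hnx, hgeo, _, _, _⟩ := pv_run_facts x rest hpw
      have hm' : m ≤ 1 + ((rest.takeWhile (fun y => y == x)).length : Int) := hm
      simp only [pvRunScan, if_pos hm']
      refine List.Pairwise.cons ?_ (ih hopw)
      intro a ha
      have hmem := ((mem_runScan m _ hopw a).mp ha).1
      exact lt_of_le_of_ne (hgeo a hmem) (Ne.symm (fun h => hnx (h ▸ hmem)))
  | case3 x rest run hm ih =>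
      obtain ⟨hopw, _, _, _, _, _⟩ := pv_run_facts x rest hpw
      have hm' : ¬ m ≤ 1 + ((rest.takeWhile (fun y => y == x)).length : Int) := hm
      simp only [pvRunScan, if_neg hm']
      exact ih hopw

-- the generator-with-condition = filter (specific instance used to rewrite A's filterMap)
lemma filterMap_guard_eq_filter (l : List String) (p : String → Bool) :
    l.filterMap (fun k => if p k then some k else none) = l.filter p := by
  induction l with
  | nil => rfl
  | cons x t ih =>
      by_cases h : p x = true
      · simp [List.filterMap_cons, List.filter_cons, h, ih]
      · simp [List.filterMap_cons, List.filter_cons, h, ih]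

-- ===== VERDICT (by name: the statement is the Claim_ definition above) =====
theorem list_scopes_spec : Claim_equal_list_scopes := by
  intro env separator min_keys _ _
  unfold Spec_list_scopes
  show list_scopes env separator min_keys = list_scopes_alt env separator min_keys
  unfold list_scopes list_scopes_alt
  rw [foldA_eq_counter]
  set P : List String := env.filterMap (fun kv =>
    if PySem.Str.isIn separator kv.1 then some (pvPrefix kv.1 separator) else none) with hP
  rw [PySem.Dict.items_counter, List.filterMap_map]
  have hcomp : ((fun (sc : String × Int) => if min_keys ≤ sc.2 then some sc.1 else none) ∘
      (fun k => (k, (P.count k : Int))))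
      = fun k => if (decide (min_keys ≤ (P.count k : Int)) : Bool) then some k else none := by
    funext k
    by_cases h : min_keys ≤ (P.count k : Int) <;> simp [h]
  rw [hcomp, filterMap_guard_eq_filter]
  have hSpw : (PySem.List.sorted P (fun s => s) false).Pairwise (· ≤ ·) := by
    simpa using PySem.List.sorted_pairwise P (fun s => s)
  refine PySem.List.sorted_eq_of_perm_of_pairwise_lt _ _ _ ?_ ?_
  · have hnd1 : (pvRunScan (PySem.List.sorted P (fun s => s) false) min_keys).Nodup :=
      (runScan_pairwise_lt min_keys _ hSpw).imp ne_of_lt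
    have hnd2 : ((PySem.Set.ofList P).filter
        (fun k => decide (min_keys ≤ (P.count k : Int)))).Nodup :=
      (PySem.Set.nodup_ofList P).filter _
    refine (List.perm_ext_iff_of_nodup hnd1 hnd2).mpr ?_
    intro a
    rw [mem_runScan min_keys _ hSpw a, List.mem_filter, PySem.Set.mem_ofList,
      PySem.List.mem_sorted, (PySem.List.sorted_perm P (fun s => s) false).count_eq]
    simp
  · exact runScan_pairwise_lt min_keys _ hSpw
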